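-- pv_equiv track=rewrite | github.com/MOHAMED-CSTC/Package_Python | packege python/packege python/Mohamed/module1.py | categorize_numbers
-- ===== SOURCE A (Python) =====
-- def categorize_numbers(numbers):
--     """Categorizes numbers into 'positive', 'negative', and 'zero'."""
--     categories = {"positive": [], "negative": [], "zero": []}
--     for num in numbers:
--         if num > 0:
--             categories["positive"].append(num)
--         elif num < 0:
--             categories["negative"].append(num)
--         else:
--             categories["zero"].append(num)
--     return categories
-- ===== SOURCE B (Python) =====
-- def categorize_numbers(numbers):
--     """Categorizes numbers into 'positive', 'negative', and 'zero'."""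
--     nums = list(numbers)
--     return {
--         "positive": [n for n in nums if n > 0],
--         "negative": [n for n in nums if n < 0],
--         "zero": [n for n in nums if n == 0],
--     }
-- ===== Notes on version B (the rewrite author's own statement) =====
-- stated objective: idiomatic
-- what changed: Replaced the single branched accumulating loop over a pre-built dict with three independent list-comprehension filters, one per bucket.
import Mathlib
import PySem

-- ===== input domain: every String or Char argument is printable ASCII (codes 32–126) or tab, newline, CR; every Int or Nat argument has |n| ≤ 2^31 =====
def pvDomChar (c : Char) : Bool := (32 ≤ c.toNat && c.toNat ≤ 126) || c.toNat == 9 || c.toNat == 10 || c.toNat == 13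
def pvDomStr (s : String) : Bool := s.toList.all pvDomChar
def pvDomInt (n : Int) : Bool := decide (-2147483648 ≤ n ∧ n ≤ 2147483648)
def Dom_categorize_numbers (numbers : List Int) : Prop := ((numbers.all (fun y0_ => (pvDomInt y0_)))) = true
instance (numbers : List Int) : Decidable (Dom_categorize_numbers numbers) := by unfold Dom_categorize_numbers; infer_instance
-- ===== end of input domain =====

-- B replaces A's single branched accumulating pass with three independent filters (idiomatic decomposition; same cost).

-- ===== PORT A =====
-- A's dict has the three fixed keys "positive"/"negative"/"zero" created up front; the loop
-- appends to one bucket per element; ported as a fold over the triple of bucket lists.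
def categorize_numbers (numbers : List Int) : List (String × List Int) :=
  let cats := numbers.foldl (fun (acc : List Int × List Int × List Int) num =>
    if num > 0 then (acc.1 ++ [num], acc.2.1, acc.2.2)
    else if num < 0 then (acc.1, acc.2.1 ++ [num], acc.2.2)
    else (acc.1, acc.2.1, acc.2.2 ++ [num])) ([], [], [])
  [("positive", cats.1), ("negative", cats.2.1), ("zero", cats.2.2)]

-- ===== PORT B =====
def categorize_numbers_alt (numbers : List Int) : List (String × List Int) :=
  [("positive", numbers.filter (fun n => n > 0)),
   ("negative", numbers.filter (fun n => n < 0)),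
   ("zero", numbers.filter (fun n => n == 0))]

-- ===== PRECONDITION & SPEC =====
def Spec_categorize_numbers (numbers : List Int) (out : List (String × List Int)) : Prop := out = categorize_numbers_alt numbers
instance (numbers : List Int) (out : List (String × List Int)) : Decidable (Spec_categorize_numbers numbers out) := by unfold Spec_categorize_numbers; infer_instance

-- ===== CLAIM (what is proved, stated in full; the proofs are below) =====
def Claim_equal_categorize_numbers : Prop := ∀ (numbers : List Int), Dom_categorize_numbers numbers → Spec_categorize_numbers numbers (categorize_numbers numbers)

-- ===== LEMMAS AND PROOFS =====

-- loop invariant: the fold extends each initial bucket with the corresponding filter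
theorem categorize_numbers_fold (numbers : List Int) (p n z : List Int) :
    numbers.foldl (fun (acc : List Int × List Int × List Int) num =>
      if num > 0 then (acc.1 ++ [num], acc.2.1, acc.2.2)
      else if num < 0 then (acc.1, acc.2.1 ++ [num], acc.2.2)
      else (acc.1, acc.2.1, acc.2.2 ++ [num])) (p, n, z)
    = (p ++ numbers.filter (fun x => x > 0),
       n ++ numbers.filter (fun x => x < 0),
       z ++ numbers.filter (fun x => x == 0)) := by
  induction numbers generalizing p n z with
  | nil => simp
  | cons a t ih =>
    simp only [List.foldl_cons, List.filter_cons]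
    by_cases h1 : a > 0
    · have h2 : ¬ a < 0 := by omega
      have h3 : ¬ (a == 0) = true := by simpa using by omega
      simp [h1, h2, h3, ih]
    · by_cases h2 : a < 0
      · have h3 : ¬ (a == 0) = true := by simpa using by omega
        simp [h1, h2, h3, ih]
      · have h3 : (a == 0) = true := by simpa using by omega
        simp [h1, h2, h3, ih]

-- ===== VERDICT (by name: the statement is the Claim_ definition above) =====
theorem categorize_numbers_spec : Claim_equal_categorize_numbers := by
  intro numbers _
  unfold Spec_categorize_numbers categorize_numbers categorize_numbers_alt
  simp [categorize_numbers_fold]
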